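-- pv_equiv track=rewrite | github.com/fabricio-m14/UTNFRA_PARCIAL_1_PROGRAMACION_ | Punto 1.py | a_num
-- ===== SOURCE A (Python) =====
-- def a_num(c):
--     digitos = "0123456789"
--     i = 0
--     while i < 10:
--         if c == digitos[i]:
--             return i
--         i += 1
--     return -1
-- ===== SOURCE B (Python) =====
-- def a_num(c):
--     if isinstance(c, str) and len(c) == 1 and '0' <= c <= '9':
--         return ord(c) - 48
--     return -1
-- ===== Notes on version B (the rewrite author's own statement) =====
-- stated objective: idiomatic
-- what changed: Replaces the while-loop scan over the digit string with a closed-form arithmetic conversion: a single-character range check '0' <= c <= '9' followed by ord(c) - 48.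
import Mathlib
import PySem

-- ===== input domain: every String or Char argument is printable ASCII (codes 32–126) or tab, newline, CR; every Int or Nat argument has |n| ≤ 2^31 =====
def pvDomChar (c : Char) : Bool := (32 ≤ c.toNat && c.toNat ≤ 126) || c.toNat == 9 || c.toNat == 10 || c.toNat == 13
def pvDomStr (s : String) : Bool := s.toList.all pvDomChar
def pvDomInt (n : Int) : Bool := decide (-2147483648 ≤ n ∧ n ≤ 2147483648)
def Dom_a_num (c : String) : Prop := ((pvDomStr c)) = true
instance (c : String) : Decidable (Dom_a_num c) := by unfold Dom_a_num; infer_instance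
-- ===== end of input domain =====

-- B replaces A's while-loop scan over "0123456789" with a closed-form range check and
-- ord-arithmetic (objective: idiomatic, O(1) vs a 10-step scan).

-- ===== PORT A =====
-- while i < 10: if c == digitos[i]: return i; i += 1 — string equality ported on the
-- toList side; digitos[i] via PySem.Str.pyGet? (always some here since i < 10 keeps the
-- index in range, so the none branch is unreachable and Python never raises).
def a_numLoop (c : List Char) (i : Nat) : Int :=
  if i < 10 then
    match PySem.Str.pyGet? "0123456789" (i : Int) with
    | some d => if c = [d] then (i : Int) else a_numLoop c (i + 1)
    | none => -1
  else -1
termination_by 10 - i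

def a_num (c : String) : Int := a_numLoop c.toList 0

-- ===== PORT B =====
-- len(c) == 1 and '0' <= c <= '9' → ord(c) - 48, else -1 (the isinstance guard is moot
-- here: the Lean argument is a String).
def a_num_alt (c : String) : Int :=
  match c.toList with
  | [ch] => if '0' ≤ ch ∧ ch ≤ '9' then (ch.toNat : Int) - 48 else -1
  | _ => -1

-- ===== PRECONDITION & SPEC =====
def Spec_a_num (c : String) (out : Int) : Prop := out = a_num_alt c
instance (c : String) (out : Int) : Decidable (Spec_a_num c out) := by unfold Spec_a_num; infer_instance

-- ===== CLAIM (what is proved, stated in full; the proofs are below) =====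
def Claim_equal_a_num : Prop := ∀ (c : String), Dom_a_num c → Spec_a_num c (a_num c)

-- ===== LEMMAS AND PROOFS =====

theorem char_eq_of_toNat_eq (a b : Char) (h : a.toNat = b.toNat) : a = b := by
  apply Char.ext; apply UInt32.toNat.inj; exact h

theorem a_num_eq_alt (c : String) : a_num c = a_num_alt c := by
  unfold a_num a_num_alt
  rcases hc : c.toList with _ | ⟨ch, _ | ⟨c2, t⟩⟩
  · show a_numLoop [] 0 = _
    rw [a_numLoop]; norm_num
    rw [a_numLoop]; norm_num
    rw [a_numLoop]; norm_num
    rw [a_numLoop]; norm_num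
    rw [a_numLoop]; norm_num
    rw [a_numLoop]; norm_num
    rw [a_numLoop]; norm_num
    rw [a_numLoop]; norm_num
    rw [a_numLoop]; norm_num
    rw [a_numLoop]; norm_num
    rw [a_numLoop]; norm_num
    decide
  · -- single character: unroll the ten loop steps
    show a_numLoop [ch] 0 = _
    rw [a_numLoop]; norm_num
    rw [a_numLoop]; norm_num
    rw [a_numLoop]; norm_num
    rw [a_numLoop]; norm_num
    rw [a_numLoop]; norm_num
    rw [a_numLoop]; norm_num
    rw [a_numLoop]; norm_num
    rw [a_numLoop]; norm_num
    rw [a_numLoop]; norm_num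
    rw [a_numLoop]; norm_num
    rw [a_numLoop]; norm_num
    by_cases hd : '0' ≤ ch ∧ ch ≤ '9'
    · have h1 : 48 ≤ ch.toNat := hd.1
      have h2 : ch.toNat ≤ 57 := hd.2
      interval_cases h : ch.toNat <;>
        (first
          | (have := char_eq_of_toNat_eq ch '0' (by rw [h]; decide); subst this; decide)
          | (have := char_eq_of_toNat_eq ch '1' (by rw [h]; decide); subst this; decide)
          | (have := char_eq_of_toNat_eq ch '2' (by rw [h]; decide); subst this; decide)
          | (have := char_eq_of_toNat_eq ch '3' (by rw [h]; decide); subst this; decide)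
          | (have := char_eq_of_toNat_eq ch '4' (by rw [h]; decide); subst this; decide)
          | (have := char_eq_of_toNat_eq ch '5' (by rw [h]; decide); subst this; decide)
          | (have := char_eq_of_toNat_eq ch '6' (by rw [h]; decide); subst this; decide)
          | (have := char_eq_of_toNat_eq ch '7' (by rw [h]; decide); subst this; decide)
          | (have := char_eq_of_toNat_eq ch '8' (by rw [h]; decide); subst this; decide)
          | (have := char_eq_of_toNat_eq ch '9' (by rw [h]; decide); subst this; decide))
    · have h0 : ch ≠ '0' := by rintro rfl; exact hd (by decide)
      have h1 : ch ≠ '1' := by rintro rfl; exact hd (by decide)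
      have h2 : ch ≠ '2' := by rintro rfl; exact hd (by decide)
      have h3 : ch ≠ '3' := by rintro rfl; exact hd (by decide)
      have h4 : ch ≠ '4' := by rintro rfl; exact hd (by decide)
      have h5 : ch ≠ '5' := by rintro rfl; exact hd (by decide)
      have h6 : ch ≠ '6' := by rintro rfl; exact hd (by decide)
      have h7 : ch ≠ '7' := by rintro rfl; exact hd (by decide)
      have h8 : ch ≠ '8' := by rintro rfl; exact hd (by decide)
      have h9 : ch ≠ '9' := by rintro rfl; exact hd (by decide)
      simp [h0, h1, h2, h3, h4, h5, h6, h7, h8, h9, hd]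
  · -- length ≥ 2: every comparison with a one-character string fails
    show a_numLoop (ch :: c2 :: t) 0 = _
    rw [a_numLoop]; norm_num
    rw [a_numLoop]; norm_num
    rw [a_numLoop]; norm_num
    rw [a_numLoop]; norm_num
    rw [a_numLoop]; norm_num
    rw [a_numLoop]; norm_num
    rw [a_numLoop]; norm_num
    rw [a_numLoop]; norm_num
    rw [a_numLoop]; norm_num
    rw [a_numLoop]; norm_num
    rw [a_numLoop]; norm_num
    simp [PySem.List.pyGet?, PySem.List.pyIdx?]

-- ===== VERDICT (by name: the statement is the Claim_ definition above) =====
theorem a_num_spec : Claim_equal_a_num := by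
  intro c _
  unfold Spec_a_num
  exact a_num_eq_alt c
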